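-- pv_equiv track=rewrite | github.com/readikus/royston | royston/tc_overlap_strategy.py | remove_sub_phrases
-- ===== SOURCE A (Python) =====
-- def is_sub_phrase(phrase_a, phrase_b):
--
--     """
--     Returns true if one phrase is a sub phrase of the other.
--
--     @params a (Array) an array of words
--     @params b (Array) another array of words
--     @return boolean - whether a or b is a sub-phrase of the other.
--     """
--
--     # if either are empty, return false
--     if (
--         phrase_a is None
--         or phrase_b is None
--         or len(phrase_a) == 0
--         or len(phrase_b) == 0
--     ):
--         return False
--
--     # swap phrases if a is less than b
--     [a, b] = (
--         [phrase_b, phrase_a]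
--         if len(phrase_b) > len(phrase_a)
--         else [phrase_a, phrase_b]
--     )
--
--     # Given that b is either the same or shorter than a, b will be a sub set
--     # a, so start matching  similar shorter  find where the first match.
--     if not b[0] in a:
--         return False
--
--     start = a.index(b[0])
--
--     # it was found, and check there is space
--     # Rewrite just subtract a from start .. (start + )
--     if (start >= 0) and ((start + len(b)) <= len(a)):
--         # check the rest matches
--         for j in range(1, len(b)):
--             if b[j] != a[start + j]:
--                 return False
--
--         return True
--
--     return False
--
-- def remove_sub_phrases(trend_phrases):
--
--     # sort based on length
--     trend_phrases = sorted(
--         trend_phrases, key=lambda ngram: -len(ngram["phrases"])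
--     )
--     for i in range(len(trend_phrases)):
--         for j in range(i + 1, len(trend_phrases)):
--             if (
--                 trend_phrases[i] is not None
--                 and trend_phrases[j] is not None
--                 and is_sub_phrase(
--                     trend_phrases[i]["phrases"], trend_phrases[j]["phrases"]
--                 )
--             ):
--                 # keep the biggest one
--                 trend_phrases[j] = None
--     return list(filter(lambda x: x is not None, trend_phrases))
-- ===== SOURCE B (Python) =====
-- def is_sub_phrase(phrase_a, phrase_b):
--
--     """
--     Returns true if one phrase is a sub phrase of the other.
--     """
--
--     if (
--         phrase_a is None
--         or phrase_b is None
--         or len(phrase_a) == 0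
--         or len(phrase_b) == 0
--     ):
--         return False
--
--     [a, b] = (
--         [phrase_b, phrase_a]
--         if len(phrase_b) > len(phrase_a)
--         else [phrase_a, phrase_b]
--     )
--
--     if not b[0] in a:
--         return False
--
--     start = a.index(b[0])
--
--     if (start >= 0) and ((start + len(b)) <= len(a)):
--         for j in range(1, len(b)):
--             if b[j] != a[start + j]:
--                 return False
--         return True
--
--     return False
--
--
-- def remove_sub_phrases(trend_phrases):
--     # Single accumulator pass over the length-sorted list: keep a phrase only
--     # if it is not a sub-phrase of any phrase already kept.
--     kept = []
--     for phrase in sorted(trend_phrases, key=lambda ngram: -len(ngram["phrases"])):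
--         if not any(is_sub_phrase(k["phrases"], phrase["phrases"]) for k in kept):
--             kept.append(phrase)
--     return kept
-- ===== Notes on version B (the rewrite author's own statement) =====
-- stated objective: simpler
-- what changed: Replaces the nested two-index loop that marks victims with None sentinels in a mutable copy (followed by a filter pass) by a single forward pass that appends a phrase to an accumulator of kept phrases only if it is not a sub-phrase of any already-kept phrase.
import Mathlib
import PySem

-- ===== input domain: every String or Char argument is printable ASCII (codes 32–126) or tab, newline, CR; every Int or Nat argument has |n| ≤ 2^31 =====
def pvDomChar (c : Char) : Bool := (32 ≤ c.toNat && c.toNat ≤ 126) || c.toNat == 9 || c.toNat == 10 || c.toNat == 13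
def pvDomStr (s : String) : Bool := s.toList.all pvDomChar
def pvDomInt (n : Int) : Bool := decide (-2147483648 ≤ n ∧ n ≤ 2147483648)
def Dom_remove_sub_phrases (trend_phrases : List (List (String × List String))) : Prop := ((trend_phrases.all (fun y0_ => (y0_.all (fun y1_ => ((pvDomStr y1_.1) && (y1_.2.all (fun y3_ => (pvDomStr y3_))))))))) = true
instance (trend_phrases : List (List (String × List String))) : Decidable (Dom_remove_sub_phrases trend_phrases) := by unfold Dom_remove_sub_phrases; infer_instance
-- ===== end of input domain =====

-- B replaces A's nested two-index loop (marking victims with None sentinels in a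
-- mutable copy, then filtering) by a single accumulator pass over the same sorted
-- list; objective: simpler. Return-value equivalence only (neither mutates its argument).

-- ===== PORT A =====
-- ngram["phrases"] — total here; Pre_ below excludes inputs where the key is missing (Python KeyError)
def phrasesOf (d : List (String × List String)) : List String :=
  (PySem.Dict.get? (PySem.Dict.mk d) "phrases").getD []

-- shared helper `is_sub_phrase` (defined verbatim in both Python files; call sites
-- always pass lists, so the `is None` guards are vacuous and only the len==0 tests remain)
def is_sub_phrase (phrase_a phrase_b : List String) : Bool :=
  if phrase_a.length == 0 || phrase_b.length == 0 then false
  else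
    -- swap phrases if a is less than b
    let ab := if phrase_b.length > phrase_a.length then (phrase_b, phrase_a) else (phrase_a, phrase_b)
    let a := ab.1
    let b := ab.2
    if !(a.contains (b.getD 0 "")) then false
    else
      match PySem.List.index? a (b.getD 0 "") with
      | none => false      -- unreachable: b[0] ∈ a
      | some start =>
        -- `start >= 0` of the Python is trivially true (index? returns a Nat position)
        if start + b.length ≤ a.length then
          -- for j in range(1, len(b)): early `return False` ⇔ `all`
          (List.range' 1 (b.length - 1)).all
            (fun j => b.getD j "" == a.getD (start + j) "")
        else false

-- the guarded inner-loop condition: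
-- trend_phrases[i] is not None and trend_phrases[j] is not None and is_sub_phrase(...)
def pvKill (o p : Option (List (String × List String))) : Bool :=
  match o, p with
  | some di, some dj => is_sub_phrase (phrasesOf di) (phrasesOf dj)
  | _, _ => false

-- the inner loop's body: trend_phrases[j] = None when the guard fires
def pvStep (st : List (Option (List (String × List String)))) (i j : Nat) :
    List (Option (List (String × List String))) :=
  if pvKill (st.getD i none) (st.getD j none) then st.set j none else st

-- inner `for j in range(i + 1, len(trend_phrases))` loop (n = the fixed length)
def pvF (n : Nat) (st : List (Option (List (String × List String)))) (i : Nat) :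
    List (Option (List (String × List String))) :=
  (List.range' (i + 1) (n - (i + 1))).foldl (fun st j => pvStep st i j) st

def remove_sub_phrases (trend_phrases : List (List (String × List String))) :
    List (List (String × List String)) :=
  -- sort based on length
  let s := PySem.List.sorted trend_phrases (fun ngram => -((phrasesOf ngram).length : Int))
  let n := s.length
  -- for i in range(n): for j in range(i+1, n): mark; then list(filter(lambda x: x is not None, ...))
  ((List.range n).foldl (pvF n) (s.map some)).filterMap id

-- ===== PORT B =====
def remove_sub_phrases_alt (trend_phrases : List (List (String × List String))) :
    List (List (String × List String)) :=
  (PySem.List.sorted trend_phrases (fun ngram => -((phrasesOf ngram).length : Int))).foldl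
    (fun kept phrase =>
      if kept.any (fun k => is_sub_phrase (phrasesOf k) (phrasesOf phrase)) then kept
      else kept ++ [phrase]) []

-- ===== PRECONDITION & SPEC =====
-- Pre_ excludes exactly the inputs on which the Python A raises KeyError:
-- some element has no "phrases" key (B raises there too).
def Pre_remove_sub_phrases (trend_phrases : List (List (String × List String))) : Prop :=
  ∀ d ∈ trend_phrases, (PySem.Dict.get? (PySem.Dict.mk d) "phrases").isSome = true
instance (trend_phrases : List (List (String × List String))) : Decidable (Pre_remove_sub_phrases trend_phrases) := by unfold Pre_remove_sub_phrases; infer_instance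

def pvWitness_remove_sub_phrases : (List (List (String × List String))) :=
  [[("phrases", ["ab", "a"])], [("phrases", ["a"])]]

def Spec_remove_sub_phrases (trend_phrases : List (List (String × List String))) (out : List (List (String × List String))) : Prop := out = remove_sub_phrases_alt trend_phrases
instance (trend_phrases : List (List (String × List String))) (out : List (List (String × List String))) : Decidable (Spec_remove_sub_phrases trend_phrases out) := by unfold Spec_remove_sub_phrases; infer_instance

-- ===== CLAIM (what is proved, stated in full; the proofs are below) =====
def Claim_equal_remove_sub_phrases : Prop := ∀ (trend_phrases : List (List (String × List String))), Dom_remove_sub_phrases trend_phrases → Pre_remove_sub_phrases trend_phrases → Spec_remove_sub_phrases trend_phrases (remove_sub_phrases trend_phrases)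

-- ===== LEMMAS AND PROOFS =====

-- `mkf o` is what one inner pass with pivot o does to a later entry
def mkf (o p : Option (List (String × List String))) : Option (List (String × List String)) :=
  if pvKill o p then none else p

-- the sieve A's marking loops implement: keep the head, kill matching later entries, recurse
def pvSieve : List (Option (List (String × List String))) → List (List (String × List String))
  | [] => []
  | none :: tl => pvSieve tl
  | some x :: tl => x :: pvSieve (tl.map (mkf (some x)))
termination_by l => l.length
decreasing_by all_goals simp

theorem mkf_none (p : Option (List (String × List String))) : mkf none p = p := by
  cases p <;> rfl

-- a loop over shifted indices on a cons state is the loop on the tail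
theorem pvFoldShift {σ τ : Type} (g : σ → τ) (F : τ → Nat → τ) (F' : σ → Nat → σ)
    (h : ∀ st j, F (g st) (j + 1) = g (F' st j)) :
    ∀ (js : List Nat) (st : σ), (js.map (· + 1)).foldl F (g st) = g (js.foldl F' st) := by
  intro js
  induction js with
  | nil => intro st; rfl
  | cons j js ih => intro st; simp only [List.map_cons, List.foldl_cons, h]; exact ih _

theorem pvRange'_shift (s n : Nat) : List.range' (s + 1) n = (List.range' s n).map (· + 1) := by
  induction n generalizing s with
  | zero => rfl
  | succ n ih =>
    rw [List.range'_succ, List.range'_succ, List.map_cons, ih]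

theorem pvStep_shift (o : Option (List (String × List String)))
    (st : List (Option (List (String × List String)))) (i j : Nat) :
    pvStep (o :: st) (i + 1) (j + 1) = o :: pvStep st i j := by
  simp only [pvStep, List.getD_cons_succ]
  split <;> rfl

theorem pvF_shift (o : Option (List (String × List String))) (n : Nat)
    (st : List (Option (List (String × List String)))) (i : Nat) :
    pvF (n + 1) (o :: st) (i + 1) = o :: pvF n st i := by
  have hn : n + 1 - (i + 1 + 1) = n - (i + 1) := by omega
  rw [pvF, hn, pvRange'_shift]
  exact pvFoldShift (o :: ·) _ _ (fun st j => pvStep_shift o st i j) _ st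

-- the first inner pass (pivot = head) marks the whole tail with `mkf`
theorem pvF_head (o : Option (List (String × List String)))
    (tl : List (Option (List (String × List String)))) (j : Nat) :
    (List.range' (j + 1) (tl.length - j)).foldl (fun st k => pvStep st 0 k) (o :: tl)
      = o :: (tl.take j ++ (tl.drop j).map (mkf o)) := by
  induction hm : tl.length - j generalizing tl j with
  | zero =>
    have hj : tl.length ≤ j := by omega
    simp [List.take_of_length_le hj, List.drop_of_length_le hj]
  | succ m ih =>
    have hj : j < tl.length := by omega
    rw [List.range'_succ, List.foldl_cons]
    have hget : (o :: tl).getD (j + 1) none = tl[j] := by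
      simp [List.getD_eq_getElem?_getD, hj]
    set tl' := if pvKill o tl[j] then tl.set j none else tl with htl'
    have hstep : pvStep (o :: tl) 0 (j + 1) = o :: tl' := by
      rw [pvStep, List.getD_cons_zero, hget, htl']
      split <;> rfl
    have hlen : tl'.length = tl.length := by rw [htl']; split <;> simp
    rw [hstep, ih tl' (j + 1) (by omega)]
    congr 1
    have hjlt' : j < tl'.length := by omega
    have hdrop : tl'.drop (j + 1) = tl.drop (j + 1) := by
      rw [htl']; split
      · simp [List.drop_set]
      · rfl
    have htakej : tl'.take j = tl.take j := by
      rw [htl']; split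
      · rw [List.take_set,
          List.set_eq_of_length_le (by rw [List.length_take]; exact min_le_left _ _)]
      · rfl
    have hjelem : tl'[j]'hjlt' = mkf o tl[j] := by
      by_cases hcv : pvKill o tl[j] = true
      · simp only [htl', mkf, hcv, if_true]
        exact List.getElem_set_self _
      · simp only [htl', mkf, hcv]
        simp
    calc tl'.take (j + 1) ++ (tl'.drop (j + 1)).map (mkf o)
        = tl.take j ++ (mkf o tl[j] :: (tl.drop (j + 1)).map (mkf o)) := by
          rw [List.take_add_one, List.getElem?_eq_getElem hjlt', hjelem, hdrop, htakej]
          simp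
      _ = tl.take j ++ (tl.drop j).map (mkf o) := by
          rw [List.drop_eq_getElem_cons hj, List.map_cons]

-- the whole nested loop pass, filtered, is the sieve
theorem pvOuter_filterMap (st : List (Option (List (String × List String)))) :
    ((List.range st.length).foldl (pvF st.length) st).filterMap id = pvSieve st := by
  fun_induction pvSieve st with
  | case1 => rfl
  | case2 tl ih =>
    rw [List.range_eq_range', List.length_cons, List.range'_succ,
      List.foldl_cons,
      show pvF (tl.length + 1) (none :: tl) 0
          = none :: (tl.take 0 ++ (tl.drop 0).map (mkf none)) from pvF_head none tl 0,
      pvRange'_shift]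
    simp only [List.take_zero, List.drop_zero, List.nil_append]
    rw [pvFoldShift (none :: ·) _ _ (fun st i => pvF_shift none tl.length st i)]
    rw [show List.map (mkf none) tl = tl from by
      simpa using List.map_congr_left (fun p _ => mkf_none p)] at *
    rw [show List.range' 0 tl.length = List.range tl.length from
      List.range_eq_range'.symm] at *
    simpa using ih
  | case3 x tl ih =>
    rw [List.range_eq_range', List.length_cons, List.range'_succ,
      List.foldl_cons,
      show pvF (tl.length + 1) (some x :: tl) 0
          = some x :: (tl.take 0 ++ (tl.drop 0).map (mkf (some x))) from pvF_head (some x) tl 0,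
      pvRange'_shift]
    simp only [List.take_zero, List.drop_zero, List.nil_append]
    rw [pvFoldShift (some x :: ·) _ _ (fun st i => pvF_shift (some x) tl.length st i)]
    rw [show List.range' 0 tl.length = List.range tl.length from
      List.range_eq_range'.symm]
    rw [show tl.length = (tl.map (mkf (some x))).length from by simp] at *
    simpa using ih

-- B's accumulator pass, related to the sieve: the not-yet-processed elements,
-- pre-marked by the kept list
def pvOpt (kept : List (List (String × List String))) (s : List (List (String × List String))) :
    List (Option (List (String × List String))) :=
  s.map (fun p => if kept.any (fun k => is_sub_phrase (phrasesOf k) (phrasesOf p)) then none else some p)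

theorem pvFold (s kept : List (List (String × List String))) :
    s.foldl (fun kept phrase =>
      if kept.any (fun k => is_sub_phrase (phrasesOf k) (phrasesOf phrase)) then kept
      else kept ++ [phrase]) kept = kept ++ pvSieve (pvOpt kept s) := by
  induction s generalizing kept with
  | nil => simp [pvOpt, pvSieve]
  | cons p s' ih =>
    rw [show pvOpt kept (p :: s')
        = (if kept.any (fun k => is_sub_phrase (phrasesOf k) (phrasesOf p)) then none else some p)
          :: pvOpt kept s' from rfl]
    by_cases hc : kept.any (fun k => is_sub_phrase (phrasesOf k) (phrasesOf p)) = true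
    · rw [List.foldl_cons, if_pos hc, if_pos hc, ih, pvSieve]
    · rw [List.foldl_cons, if_neg hc, if_neg hc, ih, pvSieve]
      have hmap : (pvOpt kept s').map (mkf (some p)) = pvOpt (kept ++ [p]) s' := by
        simp only [pvOpt, List.map_map]
        refine List.map_congr_left (fun q _ => ?_)
        simp only [Function.comp]
        by_cases h1 : kept.any (fun k => is_sub_phrase (phrasesOf k) (phrasesOf q)) = true
        · simp [h1, mkf, pvKill]
        · by_cases h2 : is_sub_phrase (phrasesOf p) (phrasesOf q) = true
          · simp [h1, h2, mkf, pvKill]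
          · simp [h1, h2, mkf, pvKill]
      rw [hmap]
      simp

theorem pvOpt_nil (s : List (List (String × List String))) : pvOpt [] s = s.map some := by
  simp [pvOpt]

-- ===== VERDICT (by name: the statement is the Claim_ definition above) =====
theorem remove_sub_phrases_spec : Claim_equal_remove_sub_phrases := by
  intro tp _hdom _hpre
  show remove_sub_phrases tp = remove_sub_phrases_alt tp
  rw [remove_sub_phrases, remove_sub_phrases_alt, pvFold, pvOpt_nil]
  rw [show (PySem.List.sorted tp (fun ngram => -((phrasesOf ngram).length : Int))).length
      = ((PySem.List.sorted tp (fun ngram => -((phrasesOf ngram).length : Int))).map some).length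
    from by simp]
  rw [pvOuter_filterMap]
  simp
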